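-- pv_equiv track=rewrite | github.com/MujeebAli25/DS-502 | recommendations.py | identifyCommonWeakTopics
-- ===== SOURCE A (Python) =====
-- from collections import Counter
--
-- def identifyCommonWeakTopics(cluster_labels, ids, progress_students):
--     cluster_map = {}
--     for label, (sid, sname), student in zip(cluster_labels, ids, progress_students):
--         cluster_map.setdefault(label, []).append(student)
--
--     recommendations = {}
--     for label, students in cluster_map.items():
--         all_weak = []
--         for s in students:
--             all_weak.extend(s['weak_topics'])
--         counter = Counter(all_weak)
--         common = [t for t, cnt in counter.most_common(5)]  # top 5
--         recommendations[label] = common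
--     return recommendations
-- ===== SOURCE B (Python) =====
-- def identifyCommonWeakTopics(cluster_labels, ids, progress_students):
--     # No Counter, no grouping dict of student lists: for each distinct label (first-occurrence
--     # order) rescan the rows, collect that cluster's topics flat, and rank the distinct topics
--     # by a stable ascending sort on the negated list.count.
--     rows = list(zip(cluster_labels, ids, progress_students))
--     result = {}
--     for label, _sid_sname, _student in rows:
--         if label in result:
--             continue
--         flat = [t for lab, _i, s in rows if lab == label for t in s['weak_topics']]
--         uniq = list(dict.fromkeys(flat))
--         result[label] = sorted(uniq, key=lambda t: -flat.count(t))[:5]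
--     return result
-- ===== Notes on version B (the rewrite author's own statement) =====
-- stated objective: alternative
-- what changed: A groups students into per-cluster lists in a dict and then Counters each cluster's flattened topics; B drops Counter and the grouping dict entirely: for each distinct label in first-occurrence order it rescans the zipped rows to collect that cluster's topics flat, dedupes them in first-occurrence order, and ranks them by a stable ascending sort on the negated list.count, taking the first 5 (trades hash counting for repeated scans).
import Mathlib
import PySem

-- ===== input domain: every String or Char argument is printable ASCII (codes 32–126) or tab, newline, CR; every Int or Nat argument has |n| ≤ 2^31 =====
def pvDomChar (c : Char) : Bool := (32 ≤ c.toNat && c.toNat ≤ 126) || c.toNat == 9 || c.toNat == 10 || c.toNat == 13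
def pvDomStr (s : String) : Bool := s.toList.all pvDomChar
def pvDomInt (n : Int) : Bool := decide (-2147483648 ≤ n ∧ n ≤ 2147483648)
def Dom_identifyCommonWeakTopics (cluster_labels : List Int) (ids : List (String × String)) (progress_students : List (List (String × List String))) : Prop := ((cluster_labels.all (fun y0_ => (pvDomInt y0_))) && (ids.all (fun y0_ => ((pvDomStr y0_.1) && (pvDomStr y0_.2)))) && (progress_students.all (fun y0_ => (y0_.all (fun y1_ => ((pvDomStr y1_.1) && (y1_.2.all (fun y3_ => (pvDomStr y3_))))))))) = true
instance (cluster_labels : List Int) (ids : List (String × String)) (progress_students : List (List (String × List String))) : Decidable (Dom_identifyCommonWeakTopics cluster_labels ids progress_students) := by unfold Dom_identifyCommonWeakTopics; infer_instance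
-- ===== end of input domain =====

-- B replaces A's Counter-per-cluster pipeline (group students into a dict of lists, flatten, Counter,
-- most_common) by a rescanning alternative: for each distinct label it re-filters the rows, dedupes the
-- flat topic list and stable-sorts the distinct topics ascending by negated list.count; objective: alternative.


-- ===== PORT A =====
-- s['weak_topics'] ; Python raises KeyError where this get? is none (excluded by Pre_)
def pvWeakOf (s : List (String × List String)) : List String :=
  ((PySem.Dict.mk s).get? "weak_topics").getD []

-- Counter.most_common(5): stable sort of the items by count, descending, take 5
def pvMostCommon5 (c : PySem.Dict String Int) : List String :=
  ((PySem.List.sorted c.items (fun p => p.2) true).take 5).map (fun p => p.1)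

def identifyCommonWeakTopics (cluster_labels : List Int) (ids : List (String × String)) (progress_students : List (List (String × List String))) : List (Int × List String) :=
  -- phase 1: cluster_map[label] = list of students (setdefault + append)
  let cluster_map : PySem.Dict Int (List (List (String × List String))) :=
    (cluster_labels.zip (ids.zip progress_students)).foldl
      (fun m p => m.insert p.1 (m.getD p.1 [] ++ [p.2.2])) PySem.Dict.empty
  -- phase 2: per cluster, flatten all weak topics, Counter, top 5
  let recommendations : PySem.Dict Int (List String) :=
    cluster_map.items.foldl
      (fun r q =>
        let all_weak := q.2.foldl (fun acc s => acc ++ pvWeakOf s) []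
        r.insert q.1 (pvMostCommon5 (PySem.Dict.counter all_weak)))
      PySem.Dict.empty
  recommendations.items

-- ===== PORT B =====
def identifyCommonWeakTopics_alt (cluster_labels : List Int) (ids : List (String × String)) (progress_students : List (List (String × List String))) : List (Int × List String) :=
  let rows := cluster_labels.zip (ids.zip progress_students)
  (rows.foldl
    (fun result p =>
      if result.contains p.1 then result     -- label already done: continue
      else
        -- flat = [t for lab, _i, s in rows if lab == label for t in s['weak_topics']]
        let flat := rows.foldl (fun acc q => if q.1 == p.1 then acc ++ pvWeakOf q.2.2 else acc) []
        -- uniq = list(dict.fromkeys(flat)); sorted(uniq, key=lambda t: -flat.count(t))[:5]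
        result.insert p.1
          ((PySem.List.sorted (PySem.List.dedup flat) (fun t => -(flat.count t : Int)) false).take 5))
    PySem.Dict.empty).items

-- ===== PRECONDITION & SPEC =====
-- Pre_ excludes exactly the inputs where Python A raises KeyError: a student reached by the zip
-- without a 'weak_topics' key (B raises there too).
def Pre_identifyCommonWeakTopics (cluster_labels : List Int) (ids : List (String × String)) (progress_students : List (List (String × List String))) : Prop :=
  ((cluster_labels.zip (ids.zip progress_students)).all
    (fun p => (PySem.Dict.mk p.2.2).contains "weak_topics")) = true
instance (cluster_labels : List Int) (ids : List (String × String)) (progress_students : List (List (String × List String))) : Decidable (Pre_identifyCommonWeakTopics cluster_labels ids progress_students) := by unfold Pre_identifyCommonWeakTopics; infer_instance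

def pvWitness_identifyCommonWeakTopics : List Int × (List (String × String)) × (List (List (String × List String))) :=
  ([1, 2, 1], [("s1", "Ann"), ("s2", "Bob"), ("s3", "Cy")],
   [[("weak_topics", ["alg", "geo"])], [("weak_topics", [])], [("weak_topics", ["alg"])]])

def Spec_identifyCommonWeakTopics (cluster_labels : List Int) (ids : List (String × String)) (progress_students : List (List (String × List String))) (out : List (Int × List String)) : Prop := out = identifyCommonWeakTopics_alt cluster_labels ids progress_students
instance (cluster_labels : List Int) (ids : List (String × String)) (progress_students : List (List (String × List String))) (out : List (Int × List String)) : Decidable (Spec_identifyCommonWeakTopics cluster_labels ids progress_students out) := by unfold Spec_identifyCommonWeakTopics; infer_instance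

-- ===== CLAIM (what is proved, stated in full; the proofs are below) =====
def Claim_equal_identifyCommonWeakTopics : Prop := ∀ (cluster_labels : List Int) (ids : List (String × String)) (progress_students : List (List (String × List String))), Dom_identifyCommonWeakTopics cluster_labels ids progress_students → Pre_identifyCommonWeakTopics cluster_labels ids progress_students → Spec_identifyCommonWeakTopics cluster_labels ids progress_students (identifyCommonWeakTopics cluster_labels ids progress_students)

-- ===== LEMMAS AND PROOFS =====

-- the common canonical form both programs are reduced to
def pvFlat (rows : List (Int × (String × String) × List (String × List String))) (L : Int) : List String :=
  (rows.filter (fun q => q.1 == L)).flatMap (fun q => pvWeakOf q.2.2)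

def pvTop5 (flat : List String) : List String :=
  (PySem.List.sorted (PySem.List.dedup flat) (fun t => (flat.count t : Int)) true).take 5

def pvCanon (rows : List (Int × (String × String) × List (String × List String))) : List (Int × List String) :=
  (PySem.List.dedup (rows.map (fun p => p.1))).map (fun L => (L, pvTop5 (pvFlat rows L)))

-- conditional-append comprehension as filter + flatMap
theorem pvFoldlAppendIf {α β : Type} (p : α → Bool) (g : α → List β) (l : List α) (acc : List β) :
    l.foldl (fun acc x => if p x then acc ++ g x else acc) acc
      = acc ++ (l.filter p).flatMap g := by
  induction l generalizing acc with
  | nil => simp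
  | cons x t ih =>
      by_cases h : p x = true <;> simp [h, ih, List.append_assoc]

-- insertBy commutes with map when the order only looks through the map
theorem pvInsertByMap {α β : Type} (before : β → β → Bool) (f : α → β) (x : α) (ys : List α) :
    PySem.List.insertBy before (f x) (ys.map f)
      = (PySem.List.insertBy (fun a b => before (f a) (f b)) x ys).map f := by
  induction ys with
  | nil => rfl
  | cons y t ih =>
      simp only [List.map_cons, PySem.List.insertBy]
      by_cases h : before (f x) (f y) = true <;> simp [h, ih]

-- stable descending sort of a mapped list
theorem pvSortedMapTrue {α β κ : Type} [LT κ] [DecidableLT κ] (f : α → β) (key : β → κ) (xs : List α) :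
    PySem.List.sorted (xs.map f) key true
      = (PySem.List.sorted xs (fun x => key (f x)) true).map f := by
  show (xs.map f).foldl (fun acc z => PySem.List.insertBy (fun a b => decide (key b < key a)) z acc) []
      = (xs.foldl (fun acc x => PySem.List.insertBy (fun a b => decide (key (f b) < key (f a))) x acc) []).map f
  rw [List.foldl_map]
  have : ∀ (l : List α) (acc : List α),
      l.foldl (fun acc x => PySem.List.insertBy (fun a b => decide (key b < key a)) (f x) acc) (acc.map f)
        = (l.foldl (fun acc x => PySem.List.insertBy (fun a b => decide (key (f b) < key (f a))) x acc) acc).map f := by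
    intro l
    induction l with
    | nil => intro acc; rfl
    | cons x t ih =>
        intro acc
        simp only [List.foldl_cons, pvInsertByMap]
        exact ih _
  simpa using this xs []

-- sorting ascending by the negated Int key is the stable descending sort
theorem pvSortedNeg {α : Type} (k : α → Int) (xs : List α) :
    PySem.List.sorted xs (fun t => -(k t)) false = PySem.List.sorted xs k true := by
  show xs.foldl (fun acc x => PySem.List.insertBy (fun a b => decide (-(k a) < -(k b))) x acc) []
      = xs.foldl (fun acc x => PySem.List.insertBy (fun a b => decide (k b < k a)) x acc) []
  have h : (fun (a b : α) => decide (-(k a) < -(k b))) = fun a b => decide (k b < k a) := by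
    funext a b; simp [neg_lt_neg_iff]
  rw [h]

-- A's phase 1, characterised: items of cluster_map = labels in first-occurrence order, grouped students
theorem pvClusterMapItems (rows : List (Int × (String × String) × List (String × List String))) :
    ((rows.foldl (fun m p => m.insert p.1 (m.getD p.1 [] ++ [p.2.2])) PySem.Dict.empty).items :
        List (Int × List (List (String × List String))))
      = (PySem.List.dedup (rows.map (fun p => p.1))).map
          (fun L => (L, ((rows.filter (fun q => q.1 == L)).map (fun q => q.2.2)))) := by
  have hkeys : (rows.foldl (fun m p => m.insert p.1 (m.getD p.1 [] ++ [p.2.2])) PySem.Dict.empty).keys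
      = PySem.List.dedup (rows.map (fun p => p.1)) := by
    have := PySem.Dict.keys_foldl_insert_key rows (fun p => p.1)
      (fun m p => m.getD p.1 [] ++ [p.2.2]) (PySem.Dict.empty)
    simpa [PySem.Dict.keys_empty, PySem.Set.update_nil_left] using this
  have hnodup : (rows.foldl (fun m p => m.insert p.1 (m.getD p.1 [] ++ [p.2.2])) PySem.Dict.empty).keys.Nodup := by
    rw [hkeys]; exact PySem.List.nodup_dedup _
  have hgetD : ∀ L, (rows.foldl (fun m p => m.insert p.1 (m.getD p.1 [] ++ [p.2.2])) PySem.Dict.empty).getD L []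
      = (rows.filter (fun q => q.1 == L)).map (fun q => q.2.2) := by
    intro L
    have hmap : rows.foldl (fun m p => m.insert p.1 (m.getD p.1 [] ++ [p.2.2])) PySem.Dict.empty
        = (rows.map (fun p => (p.1, p.2.2))).foldl
            (fun d p => d.modify p.1 [] (fun x => x ++ [p.2])) PySem.Dict.empty := by
      rw [List.foldl_map]; rfl
    rw [hmap, PySem.Dict.getD_foldl_modify_append]
    simp [List.filter_map, Function.comp_def]
  rw [PySem.Dict.items_eq_map_keys _ hnodup [], hkeys]
  exact List.map_congr_left (fun L _ => by rw [hgetD L])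

-- B's outer loop, characterised: the value inserted depends only on the label
theorem pvBFold (v : Int → List String) (l : List (Int × (String × String) × List (String × List String))) :
    ((l.foldl (fun result p => if result.contains p.1 then result else result.insert p.1 (v p.1))
        PySem.Dict.empty).items : List (Int × List String))
      = (PySem.List.dedup (l.map (fun p => p.1))).map (fun L => (L, v L)) := by
  induction l using List.reverseRecOn with
  | nil => rfl
  | append_singleton t r ih =>
      rw [List.foldl_append, List.foldl_cons, List.foldl_nil]
      have hkeys : (t.foldl (fun result p => if result.contains p.1 then result else result.insert p.1 (v p.1))
          PySem.Dict.empty).keys = PySem.List.dedup (t.map (fun p => p.1)) := by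
        simp only [PySem.Dict.keys]
        rw [ih]
        simp [Function.comp_def]
      by_cases h : r.1 ∈ t.map (fun p => p.1)
      · have hc : (t.foldl (fun result p => if result.contains p.1 then result else result.insert p.1 (v p.1))
            PySem.Dict.empty).contains r.1 = true := by
          rw [PySem.Dict.contains_iff_mem_keys, hkeys]
          exact (PySem.List.mem_dedup _ _).mpr h
        rw [hc, if_pos rfl, ih]
        simp only [List.map_append, List.map_cons, List.map_nil, PySem.List.dedup_eq_ofList,
          PySem.Set.ofList_append_singleton]
        rw [PySem.Set.add_of_mem (by simpa [PySem.Set.mem_ofList] using h)]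
      · have hc : (t.foldl (fun result p => if result.contains p.1 then result else result.insert p.1 (v p.1))
            PySem.Dict.empty).contains r.1 = false := by
          rw [Bool.eq_false_iff]
          intro hcon
          rw [PySem.Dict.contains_iff_mem_keys, hkeys] at hcon
          exact h ((PySem.List.mem_dedup _ _).mp hcon)
        rw [hc]
        simp only [Bool.false_eq_true, if_false]
        rw [PySem.Dict.items_insert_of_not_contains _ _ hc, ih]
        simp only [List.map_append, List.map_cons, List.map_nil, PySem.List.dedup_eq_ofList,
          PySem.Set.ofList_append_singleton]
        rw [PySem.Set.add_of_not_mem (by simpa [PySem.Set.mem_ofList] using h)]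
        simp

-- per-label values: A's most_common(5) of the Counter = B's negated-count sort, on the same flat list
theorem pvValueEq (flat : List String) :
    pvMostCommon5 (PySem.Dict.counter flat) = pvTop5 flat := by
  unfold pvMostCommon5 pvTop5
  rw [PySem.Dict.items_counter, pvSortedMapTrue]
  simp [← List.map_take, List.map_map, Function.comp_def, PySem.List.dedup_eq_ofList]

-- A equals the canonical form
theorem pvAeqCanon (cluster_labels : List Int) (ids : List (String × String)) (progress_students : List (List (String × List String))) :
    identifyCommonWeakTopics cluster_labels ids progress_students
      = pvCanon (cluster_labels.zip (ids.zip progress_students)) := by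
  simp only [identifyCommonWeakTopics]
  rw [pvClusterMapItems]
  have hfresh := PySem.Dict.items_foldl_insert_fresh
    (l := (PySem.List.dedup ((cluster_labels.zip (ids.zip progress_students)).map (fun p => p.1))).map
      (fun L => (L, ((cluster_labels.zip (ids.zip progress_students)).filter (fun q => q.1 == L)).map (fun q => q.2.2))))
    (k := fun q => q.1)
    (v := fun q => pvMostCommon5 (PySem.Dict.counter (q.2.foldl (fun acc s => acc ++ pvWeakOf s) [])))
    (d := PySem.Dict.empty)
    (fun a _ => PySem.Dict.contains_empty _)
    (by rw [List.map_map]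
        simp only [Function.comp_def, List.map_id']
        exact PySem.List.nodup_dedup ((cluster_labels.zip (ids.zip progress_students)).map (fun p => p.1)))
  simp only [] at hfresh ⊢
  rw [hfresh]
  unfold pvCanon
  simp only [List.map_map, Function.comp_def]
  simp only [show (PySem.Dict.empty : PySem.Dict Int (List String)).items = [] from rfl, List.nil_append]
  refine List.map_congr_left (fun L _ => ?_)
  have hflat : List.foldl (fun acc s => acc ++ pvWeakOf s) []
        (((cluster_labels.zip (ids.zip progress_students)).filter (fun q => q.1 == L)).map (fun q => q.2.2))
      = pvFlat (cluster_labels.zip (ids.zip progress_students)) L := by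
    rw [PySem.List.foldl_append_eq_flatMap]
    simp [pvFlat, List.flatMap_map]
  rw [hflat, pvValueEq]

-- B equals the canonical form
theorem pvBeqCanon (cluster_labels : List Int) (ids : List (String × String)) (progress_students : List (List (String × List String))) :
    identifyCommonWeakTopics_alt cluster_labels ids progress_students
      = pvCanon (cluster_labels.zip (ids.zip progress_students)) := by
  simp only [identifyCommonWeakTopics_alt]
  rw [pvBFold (fun L =>
      (PySem.List.sorted
        (PySem.List.dedup ((cluster_labels.zip (ids.zip progress_students)).foldl
          (fun acc q => if q.1 == L then acc ++ pvWeakOf q.2.2 else acc) []))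
        (fun t => -((((cluster_labels.zip (ids.zip progress_students)).foldl
          (fun acc q => if q.1 == L then acc ++ pvWeakOf q.2.2 else acc) []).count t : Int))) false).take 5)]
  unfold pvCanon
  refine List.map_congr_left (fun L _ => ?_)
  have hflat : (cluster_labels.zip (ids.zip progress_students)).foldl
      (fun acc q => if q.1 == L then acc ++ pvWeakOf q.2.2 else acc) []
      = pvFlat (cluster_labels.zip (ids.zip progress_students)) L := by
    have h := pvFoldlAppendIf (fun q => q.1 == L) (fun q => pvWeakOf q.2.2)
      (cluster_labels.zip (ids.zip progress_students)) []
    simp only [List.nil_append] at h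
    exact h.trans rfl
  rw [hflat, pvSortedNeg]
  rfl

-- ===== VERDICT (by name: the statement is the Claim_ definition above) =====
theorem identifyCommonWeakTopics_spec : Claim_equal_identifyCommonWeakTopics := by
  intro cluster_labels ids progress_students _ _
  show identifyCommonWeakTopics cluster_labels ids progress_students
      = identifyCommonWeakTopics_alt cluster_labels ids progress_students
  rw [pvAeqCanon, pvBeqCanon]
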